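-- pv_equiv track=rewrite | github.com/wdy0401/stmg | codelag/predict_error.py | backmonth
-- ===== SOURCE A (Python) =====
-- def backmonth(y,m,k):
--     '''
--     @note:按照滞后与窗宽返回前后调整月份
--     '''
--     while(m-k<=0):
--         y=y-1
--         m=m+12
--     while(m-k>12):
--         y=y+1
--         m=m-12
--     return y,m-k
-- ===== SOURCE B (Python) =====
-- def backmonth(y, m, k):
--     q, r = divmod(m - k - 1, 12)
--     return y + q, r + 1
-- ===== Notes on version B (the rewrite author's own statement) =====
-- stated objective: simpler
-- what changed: Replaced the two normalization while-loops with a single closed-form divmod: q,r = divmod(m-k-1,12); return (y+q, r+1).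
import Mathlib
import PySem

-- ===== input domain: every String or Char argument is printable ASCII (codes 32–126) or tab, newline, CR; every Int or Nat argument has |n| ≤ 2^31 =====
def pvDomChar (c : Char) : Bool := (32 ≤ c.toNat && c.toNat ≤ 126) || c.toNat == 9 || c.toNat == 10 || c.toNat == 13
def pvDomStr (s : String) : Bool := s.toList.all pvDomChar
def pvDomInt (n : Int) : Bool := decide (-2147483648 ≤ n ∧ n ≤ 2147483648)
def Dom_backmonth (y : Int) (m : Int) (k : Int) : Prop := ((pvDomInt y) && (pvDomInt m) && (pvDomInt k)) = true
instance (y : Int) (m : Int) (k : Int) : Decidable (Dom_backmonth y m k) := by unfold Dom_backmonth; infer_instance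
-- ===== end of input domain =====

-- B replaces A's two normalization while-loops with one closed-form divmod (simpler; O(1) vs O(|m-k|)).

-- ===== PORT A =====
-- first while-loop: while m-k<=0: y-=1; m+=12
def backmonthLoop1 (y m k : Int) : Int × Int :=
  if m - k ≤ 0 then backmonthLoop1 (y - 1) (m + 12) k else (y, m)
termination_by (k - m + 12).toNat
decreasing_by omega

-- second while-loop: while m-k>12: y+=1; m-=12
def backmonthLoop2 (y m k : Int) : Int × Int :=
  if m - k > 12 then backmonthLoop2 (y + 1) (m - 12) k else (y, m)
termination_by (m - k).toNat
decreasing_by omega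

def backmonth (y : Int) (m : Int) (k : Int) : Int × Int :=
  let p := backmonthLoop1 y m k
  let q := backmonthLoop2 p.1 p.2 k
  (q.1, q.2 - k)

-- ===== PORT B =====
def backmonth_alt (y : Int) (m : Int) (k : Int) : Int × Int :=
  let q := PySem.Int.floordiv (m - k - 1) 12
  let r := PySem.Int.mod (m - k - 1) 12
  (y + q, r + 1)

-- ===== PRECONDITION & SPEC =====
def Spec_backmonth (y : Int) (m : Int) (k : Int) (out : Int × Int) : Prop := out = backmonth_alt y m k
instance (y : Int) (m : Int) (k : Int) (out : Int × Int) : Decidable (Spec_backmonth y m k out) := by unfold Spec_backmonth; infer_instance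

-- ===== CLAIM (what is proved, stated in full; the proofs are below) =====
def Claim_equal_backmonth : Prop := ∀ (y : Int) (m : Int) (k : Int), Dom_backmonth y m k → Spec_backmonth y m k (backmonth y m k)

-- ===== LEMMAS AND PROOFS =====
theorem backmonthLoop1_spec (y m k : Int) :
    12 * (backmonthLoop1 y m k).1 + (backmonthLoop1 y m k).2 = 12 * y + m ∧
    1 ≤ (backmonthLoop1 y m k).2 - k := by
  fun_induction backmonthLoop1 y m k with
  | case1 y m h ih => omega
  | case2 y m h => simp; omega

theorem backmonthLoop2_spec (y m k : Int) (h1 : 1 ≤ m - k) :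
    12 * (backmonthLoop2 y m k).1 + (backmonthLoop2 y m k).2 = 12 * y + m ∧
    1 ≤ (backmonthLoop2 y m k).2 - k ∧ (backmonthLoop2 y m k).2 - k ≤ 12 := by
  fun_induction backmonthLoop2 y m k with
  | case1 y m h ih => have := ih (by omega); omega
  | case2 y m h => simp; omega

-- ===== VERDICT (by name: the statement is the Claim_ definition above) =====
theorem backmonth_spec : Claim_equal_backmonth := by
  intro y m k _
  unfold Spec_backmonth backmonth backmonth_alt
  have h1 := backmonthLoop1_spec y m k
  have h2 := backmonthLoop2_spec (backmonthLoop1 y m k).1 (backmonthLoop1 y m k).2 k h1.2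
  rw [PySem.Int.floordiv_eq_ediv_of_pos (by omega), PySem.Int.mod_eq_emod_of_pos (by omega)]
  simp only [Prod.mk.injEq]
  omega
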